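-- pv_equiv track=rewrite | github.com/tatikonda/codewars | sum_odd_cubed_numbers.py | cube_odd
-- ===== SOURCE A (Python) =====
-- def cube_odd(arr):
--     total = 0
--     for num in arr:
--         if (type(num) != int):
--             return None
--         if num % 2 != 0:
--             total += num**3
--     return total
-- ===== SOURCE B (Python) =====
-- def cube_odd(arr):
--     arr = list(arr)
--     if not all(type(x) == int for x in arr):
--         return None
--     return sum(x**3 for x in arr if x % 2)
-- ===== Notes on version B (the rewrite author's own statement) =====
-- stated objective: simpler
-- what changed: Replaces A's single interleaved loop with early return by a materializing validation pass (all) followed by a closed sum comprehension over the odd elements.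
import Mathlib
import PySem

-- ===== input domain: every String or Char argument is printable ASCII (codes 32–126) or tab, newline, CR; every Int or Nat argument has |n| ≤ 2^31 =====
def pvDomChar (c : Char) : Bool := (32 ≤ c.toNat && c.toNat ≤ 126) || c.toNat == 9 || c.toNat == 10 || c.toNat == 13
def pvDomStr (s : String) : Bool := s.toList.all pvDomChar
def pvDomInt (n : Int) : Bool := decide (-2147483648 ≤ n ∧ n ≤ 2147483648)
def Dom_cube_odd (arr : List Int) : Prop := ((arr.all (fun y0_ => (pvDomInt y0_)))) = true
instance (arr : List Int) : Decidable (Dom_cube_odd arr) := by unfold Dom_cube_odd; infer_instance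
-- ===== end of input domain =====

-- B replaces A's single interleaved loop (with early None return) by a separate
-- validation pass plus a closed sum comprehension over the odd elements (objective: simpler).


-- ===== PORT A =====
-- A's loop: accumulate total, early `return None` on a non-int element.
-- Under the type convention every element is an Int, so the `type(num) != int`
-- test is always false; it is kept as the (vacuous) first branch of the loop body.
def cubeOddLoop (total : Int) : List Int → Option Int
  | [] => some total
  | num :: rest =>
      if False then none
      else if PySem.Int.mod num 2 ≠ 0 then cubeOddLoop (total + num ^ 3) rest
      else cubeOddLoop total rest

def cube_odd (arr : List Int) : Option Int := cubeOddLoop 0 arr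

-- ===== PORT B =====
-- B: validation pass `all(type(x) == int ...)` (vacuously true over List Int),
-- then the closed comprehension `sum(x**3 for x in arr if x % 2)`.
def cube_odd_alt (arr : List Int) : Option Int :=
  if ¬ (arr.all fun _ => true) then none
  else some (((arr.filter fun x => PySem.Int.mod x 2 ≠ 0).map fun x => x ^ 3).sum)

-- ===== PRECONDITION & SPEC =====
def Spec_cube_odd (arr : List Int) (out : Option Int) : Prop := out = cube_odd_alt arr
instance (arr : List Int) (out : Option Int) : Decidable (Spec_cube_odd arr out) := by unfold Spec_cube_odd; infer_instance

-- ===== CLAIM (what is proved, stated in full; the proofs are below) =====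
def Claim_equal_cube_odd : Prop := ∀ (arr : List Int), Dom_cube_odd arr → Spec_cube_odd arr (cube_odd arr)

-- ===== LEMMAS AND PROOFS =====
theorem cubeOddLoop_eq (arr : List Int) : ∀ (total : Int),
    cubeOddLoop total arr =
      some (total + ((arr.filter fun x => PySem.Int.mod x 2 ≠ 0).map fun x => x ^ 3).sum) := by
  induction arr with
  | nil => intro total; simp [cubeOddLoop]
  | cons num rest ih =>
      intro total
      by_cases h : Int.fmod num 2 = 0 <;>
        simp [cubeOddLoop, PySem.Int.mod, h, ih, List.filter_cons] <;> ring

-- ===== VERDICT (by name: the statement is the Claim_ definition above) =====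
theorem cube_odd_spec : Claim_equal_cube_odd := by
  intro arr _
  unfold Spec_cube_odd cube_odd cube_odd_alt
  simp [cubeOddLoop_eq]
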